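-- pv_equiv track=rewrite | github.com/CandyConfident/BILSTM_CRF_Chinese_NER | model/data_utils.py | get_chunks
-- ===== SOURCE A (Python) =====
-- NONE = "O"
--
-- def get_chunks(seq, tags):
--     """Given a sequence of tags, group entities and their position
--
--     Args:
--         seq: [4, 4, 0, 0, ...] sequence of labels
--         tags: dict["O"] = 4
--
--     Returns:
--         list of (chunk_type, chunk_start, chunk_end)
--
--     Example:
--         seq = [4, 5, 0, 3]
--         tags = {"B-PER": 4, "I-PER": 5, "B-LOC": 3}
--         result = [("PER", 0, 2), ("LOC", 3, 4)]
--
--     """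
--     default = tags[NONE]
--     idx_to_tag = {idx: tag for tag, idx in tags.items()}
--     chunks = []
--     chunk_type, chunk_start = None, None
--     for i, tok in enumerate(seq):
--         # End of a chunk 1
--         if tok == default and chunk_type is not None:
--             # Add a chunk.
--             chunk = (chunk_type, chunk_start, i)
--             chunks.append(chunk)
--             chunk_type, chunk_start = None, None
--
--         # End of a chunk + start of a chunk!
--         elif tok != default:
--             tok_chunk_class, tok_chunk_type = get_chunk_type(tok, idx_to_tag)
--             if chunk_type is None:
--                 chunk_type, chunk_start = tok_chunk_type, i
--             elif tok_chunk_type != chunk_type or tok_chunk_class == "B":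
--                 chunk = (chunk_type, chunk_start, i)
--                 chunks.append(chunk)
--                 chunk_type, chunk_start = tok_chunk_type, i
--         else:
--             pass
--
--     # end condition
--     if chunk_type is not None:
--         chunk = (chunk_type, chunk_start, len(seq))
--         chunks.append(chunk)
--
--     return chunks
--
-- def get_chunk_type(tok, idx_to_tag):
--     """
--     Args:
--         tok: id of token, ex 4
--         idx_to_tag: dictionary {4: "B-PER", ...}
--
--     Returns:
--         tuple: "B", "PER"
--
--     """
--     tag_name = idx_to_tag[tok]
--     tag_class = tag_name.split('-')[0]
--     tag_type = tag_name.split('-')[-1]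
--     return tag_class, tag_type
-- ===== SOURCE B (Python) =====
-- NONE = "O"
--
-- def get_chunks(seq, tags):
--     # Decode every token first, then emit chunks as maximal runs found by a cursor scan.
--     default = tags[NONE]
--     idx_to_tag = {idx: tag for tag, idx in tags.items()}
--     decoded = []
--     for tok in seq:
--         if tok == default:
--             decoded.append(None)
--         else:
--             name = idx_to_tag[tok]
--             parts = name.split('-')
--             decoded.append((parts[0], parts[-1]))
--     chunks = []
--     n = len(seq)
--     i = 0
--     while i < n:
--         d = decoded[i]
--         if d is None:
--             i += 1
--             continue
--         typ = d[1]
--         j = i + 1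
--         while j < n and decoded[j] is not None and decoded[j][1] == typ and decoded[j][0] != "B":
--             j += 1
--         chunks.append((typ, i, j))
--         i = j
--     return chunks
-- ===== Notes on version B (the rewrite author's own statement) =====
-- stated objective: alternative
-- what changed: Replaces A's token-by-token open-chunk state machine with a decode-all-tokens pass followed by a cursor scan that emits each chunk as a maximal run found by a forward lookahead.
import Mathlib
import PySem

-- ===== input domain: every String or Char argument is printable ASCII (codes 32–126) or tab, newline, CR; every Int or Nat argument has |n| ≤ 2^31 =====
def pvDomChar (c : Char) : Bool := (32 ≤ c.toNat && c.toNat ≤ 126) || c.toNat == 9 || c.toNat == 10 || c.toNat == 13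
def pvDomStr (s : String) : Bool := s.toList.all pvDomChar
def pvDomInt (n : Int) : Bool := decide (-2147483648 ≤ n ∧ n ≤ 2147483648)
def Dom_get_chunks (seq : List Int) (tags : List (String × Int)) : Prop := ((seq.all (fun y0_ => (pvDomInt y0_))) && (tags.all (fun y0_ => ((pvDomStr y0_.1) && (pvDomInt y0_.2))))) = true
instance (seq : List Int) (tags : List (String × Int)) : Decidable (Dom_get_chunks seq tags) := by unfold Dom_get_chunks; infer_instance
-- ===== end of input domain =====

-- B is an alternative decomposition: decode every token first, then emit chunks as maximal
-- runs found by a cursor scan, instead of A's incremental open-chunk state machine.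

-- ===== PORT A =====

-- idx_to_tag = {idx: tag for tag, idx in tags.items()}  (later entries overwrite earlier)
def pvBuildIdxToTag (tags : List (String × Int)) : PySem.Dict Int String :=
  tags.foldl (fun d p => PySem.Dict.insert d p.2 p.1) PySem.Dict.empty

-- get_chunk_type: the lookup's KeyError case (getD "") is excluded by Pre_get_chunks
def get_chunk_type (tok : Int) (idx_to_tag : PySem.Dict Int String) : String × String :=
  let tag_name := (PySem.Dict.get? idx_to_tag tok).getD ""
  let parts := (PySem.Str.split? tag_name "-").getD []  -- sep "-" ≠ "": never none
  (List.headD parts "", List.getLastD parts "")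

-- the for-loop of A; chunk_type/chunk_start are None together, carried as one Option;
-- at the end of the list i = len(seq), so the end-condition flush uses i
def pvLoopA (default : Int) (m : PySem.Dict Int String) (i : Int)
    (chunks : List (String × Int × Int)) (cur : Option (String × Int)) :
    List Int → List (String × Int × Int)
  | [] =>
    match cur with
    | none => chunks
    | some (ct, cs) => chunks ++ [(ct, cs, i)]
  | tok :: rest =>
    if tok = default then
      match cur with
      | some (ct, cs) => pvLoopA default m (i + 1) (chunks ++ [(ct, cs, i)]) none rest
      | none => pvLoopA default m (i + 1) chunks none rest
    else
      let (cls, typ) := get_chunk_type tok m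
      match cur with
      | none => pvLoopA default m (i + 1) chunks (some (typ, i)) rest
      | some (ct, cs) =>
        if typ ≠ ct ∨ cls = "B" then
          pvLoopA default m (i + 1) (chunks ++ [(ct, cs, i)]) (some (typ, i)) rest
        else
          pvLoopA default m (i + 1) chunks (some (ct, cs)) rest

def get_chunks (seq : List Int) (tags : List (String × Int)) : List (String × Int × Int) :=
  let default := (PySem.Dict.get? (PySem.Dict.mk tags) "O").getD 0  -- KeyError excluded by Pre_
  let idx_to_tag := pvBuildIdxToTag tags
  pvLoopA default idx_to_tag 0 [] none seq

-- ===== PORT B =====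

-- one decoded entry: none for the default tag, otherwise (class, type)
def pvDecodeTok (default : Int) (m : PySem.Dict Int String) (tok : Int) :
    Option (String × String) :=
  if tok = default then none
  else
    let name := (PySem.Dict.get? m tok).getD ""  -- KeyError excluded by Pre_
    let parts := (PySem.Str.split? name "-").getD []  -- sep "-" ≠ "": never none
    some (List.headD parts "", List.getLastD parts "")

-- length of the inner while-loop's run: entries continuing a chunk of type typ
def pvRunLen (typ : String) : List (Option (String × String)) → Nat
  | some (c, t) :: rest => if t = typ ∧ c ≠ "B" then pvRunLen typ rest + 1 else 0
  | _ => 0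

-- the outer while-loop of B: cursor scan emitting maximal runs
def pvScan (i : Int) : List (Option (String × String)) → List (String × Int × Int)
  | [] => []
  | none :: rest => pvScan (i + 1) rest
  | some (_, t) :: rest =>
    let k := pvRunLen t rest
    (t, i, i + 1 + k) :: pvScan (i + 1 + k) (rest.drop k)
termination_by ds => ds.length
decreasing_by all_goals (simp only [List.length_drop, List.length_cons]; omega)

def get_chunks_alt (seq : List Int) (tags : List (String × Int)) : List (String × Int × Int) :=
  let default := (PySem.Dict.get? (PySem.Dict.mk tags) "O").getD 0  -- KeyError excluded by Pre_
  let idx_to_tag := pvBuildIdxToTag tags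
  pvScan 0 (seq.map (pvDecodeTok default idx_to_tag))

-- ===== PRECONDITION & SPEC =====
-- Pre_ excludes exactly the inputs on which the Python raises KeyError: tags without the
-- key "O", and sequences containing a non-default id that is not a value of tags.
def Pre_get_chunks (seq : List Int) (tags : List (String × Int)) : Prop :=
  (PySem.Dict.get? (PySem.Dict.mk tags) "O").isSome = true ∧
  ∀ tok ∈ seq, tok = (PySem.Dict.get? (PySem.Dict.mk tags) "O").getD 0
      ∨ tok ∈ tags.map Prod.snd
instance (seq : List Int) (tags : List (String × Int)) : Decidable (Pre_get_chunks seq tags) := by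
  unfold Pre_get_chunks; infer_instance

def pvWitness_get_chunks : List Int × (List (String × Int)) :=
  ([4, 5, 0, 3], [("B-PER", 4), ("I-PER", 5), ("O", 0), ("B-LOC", 3)])

def Spec_get_chunks (seq : List Int) (tags : List (String × Int)) (out : List (String × Int × Int)) : Prop := out = get_chunks_alt seq tags
instance (seq : List Int) (tags : List (String × Int)) (out : List (String × Int × Int)) : Decidable (Spec_get_chunks seq tags out) := by unfold Spec_get_chunks; infer_instance

-- ===== CLAIM (what is proved, stated in full; the proofs are below) =====
def Claim_equal_get_chunks : Prop := ∀ (seq : List Int) (tags : List (String × Int)), Dom_get_chunks seq tags → Pre_get_chunks seq tags → Spec_get_chunks seq tags (get_chunks seq tags)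

-- ===== LEMMAS AND PROOFS =====

-- B's result continued from A's loop state: an open chunk closes after its remaining run
def pvCont (i : Int) (cur : Option (String × Int)) (ds : List (Option (String × String))) :
    List (String × Int × Int) :=
  match cur with
  | none => pvScan i ds
  | some (ct, cs) =>
    let k := pvRunLen ct ds
    (ct, cs, i + k) :: pvScan (i + k) (ds.drop k)

lemma pvDecode_default (d : Int) (m : PySem.Dict Int String) :
    pvDecodeTok d m d = none := by simp [pvDecodeTok]

lemma pvDecode_nondefault (d : Int) (m : PySem.Dict Int String) (tok : Int) (h : tok ≠ d) :
    pvDecodeTok d m tok = some (get_chunk_type tok m) := by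
  simp [pvDecodeTok, get_chunk_type, h]

-- main invariant: A's loop from any state equals B's continuation of the decoded tail
lemma pvLoop_eq_cont (default : Int) (m : PySem.Dict Int String) :
    ∀ (seq : List Int) (i : Int) (chunks : List (String × Int × Int))
      (cur : Option (String × Int)),
      pvLoopA default m i chunks cur seq
        = chunks ++ pvCont i cur (seq.map (pvDecodeTok default m)) := by
  intro seq
  induction seq with
  | nil =>
    intro i chunks cur
    match cur with
    | none => simp [pvLoopA, pvCont, pvScan]
    | some (ct, cs) => simp [pvLoopA, pvCont, pvScan, pvRunLen]
  | cons tok rest ih =>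
    intro i chunks cur
    by_cases htok : tok = default
    · subst htok
      match cur with
      | none =>
        simp only [pvLoopA, ih, List.map_cons, pvDecode_default]
        simp [pvCont, pvScan]
      | some (ct, cs) =>
        simp only [pvLoopA, ih, List.map_cons, pvDecode_default]
        simp [pvCont, pvScan, pvRunLen]
    · rcases hct : get_chunk_type tok m with ⟨cls, typ⟩
      match cur with
      | none =>
        simp only [pvLoopA, if_neg htok, hct, ih, List.map_cons, pvDecode_nondefault default m tok htok]
        simp [pvCont, pvScan]
      | some (ct, cs) =>
        by_cases hb : typ ≠ ct ∨ cls = "B"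
        · simp only [pvLoopA, if_neg htok, hct, if_pos hb, ih, List.map_cons,
            pvDecode_nondefault default m tok htok]
          have hk : pvRunLen ct (some (cls, typ) :: List.map (pvDecodeTok default m) rest) = 0 := by
            simp only [pvRunLen]
            rw [if_neg]; tauto
          simp [pvCont, pvScan, hk]
        · have hty : typ = ct := not_not.mp (not_or.mp hb).1
          have hcl : cls ≠ "B" := (not_or.mp hb).2
          subst hty
          simp only [pvLoopA, if_neg htok, hct, ih, List.map_cons,
            pvDecode_nondefault default m tok htok]
          rw [if_neg hb]
          have hk : pvRunLen typ (some (cls, typ) :: List.map (pvDecodeTok default m) rest)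
              = pvRunLen typ (List.map (pvDecodeTok default m) rest) + 1 := by
            simp [pvRunLen, hcl]
          simp only [pvCont, hk, Nat.cast_add, Nat.cast_one, List.drop_succ_cons]
          have e : i + ((pvRunLen typ (List.map (pvDecodeTok default m) rest) : Int) + 1)
              = i + 1 + (pvRunLen typ (List.map (pvDecodeTok default m) rest) : Int) := by ring
          rw [e]

-- ===== VERDICT (by name: the statement is the Claim_ definition above) =====
theorem get_chunks_spec : Claim_equal_get_chunks := by
  intro seq tags _ _
  unfold Spec_get_chunks get_chunks get_chunks_alt
  simp only [pvLoop_eq_cont]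
  simp [pvCont]
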